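-- pv_equiv track=rewrite | github.com/tommccoy1/tpdn | role_assignment_functions.py | parse_digits
-- ===== SOURCE A (Python) =====
-- def parse_digits_helper(digit_seq, tree_so_far):
--     if len(digit_seq) == 1:
--         return tree_so_far + [[[0]]]
--
--     else:
--         min_rep = 100
--         index_of_min = -1
--
--         for index, elt in enumerate(digit_seq[:-1]):
--             rep = elt
--             if rep < min_rep:
--                 min_rep = rep
--                 index_of_min = index
--
--         start_vec = range(len(digit_seq))
--         new_vec = list(start_vec[:index_of_min]) + list([[index_of_min, index_of_min + 1]]) + list(start_vec[index_of_min + 2:])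
--
--         return  parse_digits_helper(digit_seq[:index_of_min] + digit_seq[index_of_min + 1:], tree_so_far + [new_vec])
--
-- def parse_digits(digit_seq):
--     tree_so_far = [range(len(digit_seq))]
--
--     if len(digit_seq) == 1:
--         return [[[0]]]
--
--     start_seq = parse_digits_helper(digit_seq, tree_so_far)
--
--     new_seq = []
--     for elt in start_seq:
--         new_elt = []
--         for inner_elt in elt:
--             if isinstance(inner_elt, int):
--                 new_elt.append([inner_elt])
--             else:
--                 new_elt.append(inner_elt)
--         new_seq.append(new_elt)
--
--     return new_seq
-- ===== SOURCE B (Python) =====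
-- def parse_digits(digit_seq):
--     if len(digit_seq) == 1:
--         return [[[0]]]
--     seq = list(digit_seq)
--     tree = [[[j] for j in range(len(seq))]]
--     while len(seq) > 1:
--         i = seq.index(min(seq[:-1]))
--         tree.append([[j] for j in range(i)] + [[i, i + 1]]
--                     + [[j] for j in range(i + 2, len(seq))])
--         del seq[i]
--     tree.append([[0]])
--     return tree
-- ===== Notes on version B (the rewrite author's own statement) =====
-- stated objective: simpler
-- what changed: Replaced the recursive helper with its hand-rolled sentinel argmin scan (min_rep=100) and the post-hoc int-wrapping pass by a single iterative while-loop that uses min()/list.index() for the leftmost minimum, del for the removal, and builds each row already in wrapped [[j],...] form.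
import Mathlib
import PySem

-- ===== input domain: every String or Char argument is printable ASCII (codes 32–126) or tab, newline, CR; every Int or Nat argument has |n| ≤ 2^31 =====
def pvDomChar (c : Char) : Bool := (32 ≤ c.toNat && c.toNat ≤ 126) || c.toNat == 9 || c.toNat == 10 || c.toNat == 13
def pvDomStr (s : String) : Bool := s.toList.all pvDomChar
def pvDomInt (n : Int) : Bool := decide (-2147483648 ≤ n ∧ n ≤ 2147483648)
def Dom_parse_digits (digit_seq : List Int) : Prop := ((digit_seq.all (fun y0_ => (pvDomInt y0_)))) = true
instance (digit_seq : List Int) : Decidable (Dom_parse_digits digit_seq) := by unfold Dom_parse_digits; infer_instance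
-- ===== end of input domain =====

-- B replaces A's recursive helper + sentinel argmin scan (min_rep = 100) + post-hoc
-- int-wrapping pass by one iterative while-loop using min()/list.index() and rows built
-- directly in wrapped form (objective: simpler).



-- ===== PORT A =====
def pdWrap : Int ⊕ List Int → List Int
  | .inl k => [k]
  | .inr l => l

-- A's recursive helper; intermediate rows hold ints or int-lists (Int ⊕ List Int);
-- fuel only makes the recursion structural (fuel = digit_seq.length suffices on Pre_).
def parse_digits_helper (fuel : Nat) (digit_seq : List Int)
    (tree_so_far : List (List (Int ⊕ List Int))) : List (List (Int ⊕ List Int)) :=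
  match fuel with
  | 0 => tree_so_far
  | fuel + 1 =>
    if digit_seq.length = 1 then tree_so_far ++ [[Sum.inr [0]]]
    else
      let p := (PySem.List.enumerate (PySem.List.slice digit_seq none (some (-1))) 0).foldl
          (fun (st : Int × Int) ie => if ie.2 < st.1 then (ie.2, ie.1) else st) (100, -1)
      let index_of_min := p.2
      let start_vec := PySem.List.pyRange 0 (digit_seq.length : Int) 1
      let new_vec :=
        (PySem.List.slice start_vec none (some index_of_min)).map Sum.inl
          ++ [Sum.inr [index_of_min, index_of_min + 1]]
          ++ (PySem.List.slice start_vec (some (index_of_min + 2)) none).map Sum.inl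
      parse_digits_helper fuel
        (PySem.List.slice digit_seq none (some index_of_min)
          ++ PySem.List.slice digit_seq (some (index_of_min + 1)) none)
        (tree_so_far ++ [new_vec])

def parse_digits (digit_seq : List Int) : List (List (List Int)) :=
  let tree_so_far : List (List (Int ⊕ List Int)) :=
    [(PySem.List.pyRange 0 (digit_seq.length : Int) 1).map Sum.inl]
  if digit_seq.length = 1 then [[[0]]]
  else
    let start_seq := parse_digits_helper digit_seq.length digit_seq tree_so_far
    start_seq.map (fun elt => elt.map pdWrap)

-- ===== PORT B =====
-- B's while-loop as fuel recursion; fuel = the initial length (one element removed per pass)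
def parse_digits_alt_loop (fuel : Nat) (seq : List Int)
    (tree : List (List (List Int))) : List (List (List Int)) :=
  match fuel with
  | 0 => tree
  | fuel + 1 =>
    if 1 < seq.length then
      match PySem.List.min? (PySem.List.slice seq none (some (-1))) (fun x => x) with
      | none => tree
      | some m =>
        match PySem.List.index? seq m with
        | none => tree
        | some i =>
          let row := (PySem.List.pyRange 0 (i : Int) 1).map (fun j => [j])
              ++ [[(i : Int), (i : Int) + 1]]
              ++ (PySem.List.pyRange ((i : Int) + 2) (seq.length : Int) 1).map (fun j => [j])
          parse_digits_alt_loop fuel (seq.eraseIdx i) (tree ++ [row])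
    else tree ++ [[[0]]]

def parse_digits_alt (digit_seq : List Int) : List (List (List Int)) :=
  if digit_seq.length = 1 then [[[0]]]
  else
    parse_digits_alt_loop digit_seq.length digit_seq
      [(PySem.List.pyRange 0 (digit_seq.length : Int) 1).map (fun j => [j])]

-- ===== PRECONDITION & SPEC =====
-- Pre_ is exactly where A terminates: on an empty input, or when some element of the
-- dropLast prefix is ≥ 100, the sentinel scan yields index -1, the recursive call does not
-- shrink the list and A never returns; A returns on every other input.
def Pre_parse_digits (digit_seq : List Int) : Prop :=
  digit_seq ≠ [] ∧ ∀ x ∈ digit_seq.dropLast, x < 100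
instance (digit_seq : List Int) : Decidable (Pre_parse_digits digit_seq) := by
  unfold Pre_parse_digits; infer_instance

def pvWitness_parse_digits : List Int := [3, 1, 2]

def Spec_parse_digits (digit_seq : List Int) (out : List (List (List Int))) : Prop := out = parse_digits_alt digit_seq
instance (digit_seq : List Int) (out : List (List (List Int))) : Decidable (Spec_parse_digits digit_seq out) := by unfold Spec_parse_digits; infer_instance

-- ===== CLAIM (what is proved, stated in full; the proofs are below) =====
def Claim_equal_parse_digits : Prop := ∀ (digit_seq : List Int), Dom_parse_digits digit_seq → Pre_parse_digits digit_seq → Spec_parse_digits digit_seq (parse_digits digit_seq)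

-- ===== LEMMAS AND PROOFS =====
theorem pd_fold_noupd (L : List Int) : ∀ (o : Int) (st : Int × Int), (∀ y ∈ L, st.1 ≤ y) →
    (PySem.List.enumerate L o).foldl
      (fun (st : Int × Int) ie => if ie.2 < st.1 then (ie.2, ie.1) else st) st = st := by
  induction L with
  | nil => intro o st _; simp [PySem.List.enumerate_nil]
  | cons x tl ih =>
    intro o st h
    rw [PySem.List.enumerate_cons]
    simp only [List.foldl_cons]
    rw [if_neg (not_lt.mpr (h x (by simp)))]
    exact ih _ _ (fun y hy => h y (by simp [hy]))

theorem pd_fold_argmin (L : List Int) : ∀ (m : Int) (j : Nat) (o r k : Int),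
    (∀ y ∈ L, m ≤ y) → m < r → PySem.List.index? L m = some j →
    (PySem.List.enumerate L o).foldl
      (fun (st : Int × Int) ie => if ie.2 < st.1 then (ie.2, ie.1) else st) (r, k) = (m, o + j) := by
  induction L with
  | nil => intro m j o r k _ _ hj; rw [PySem.List.index?_eq_idxOf?] at hj; simp at hj
  | cons x tl ih =>
    intro m j o r k hmin hr hj
    rw [PySem.List.enumerate_cons]
    simp only [List.foldl_cons]
    by_cases hx : x = m
    · subst hx
      rw [PySem.List.index?_cons_self] at hj
      obtain rfl : (0 : Nat) = j := Option.some.inj hj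
      rw [if_pos hr]
      rw [pd_fold_noupd tl (o+1) (x, o) (fun y hy => hmin y (by simp [hy]))]
      simp
    · have hmx : m < x := lt_of_le_of_ne (hmin x (by simp)) (fun h => hx h.symm)
      rw [PySem.List.index?_cons_of_ne tl hx] at hj
      cases hidx : PySem.List.index? tl m with
      | none => rw [hidx] at hj; simp at hj
      | some j' =>
        rw [hidx] at hj
        simp only [Option.map_some] at hj
        obtain rfl : j' + 1 = j := Option.some.inj hj
        have htl : ∀ y ∈ tl, m ≤ y := fun y hy => hmin y (by simp [hy])
        by_cases hxr : x < r
        · rw [if_pos hxr, ih m j' (o+1) x o htl hmx hidx]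
          congr 1
          push_cast; ring
        · rw [if_neg hxr, ih m j' (o+1) r k htl hr hidx]
          congr 1
          push_cast; ring

theorem pd_take_pyRange (j n : Nat) (h : j ≤ n) :
    (PySem.List.pyRange 0 (n : Int) 1).take j = PySem.List.pyRange 0 (j : Int) 1 := by
  rw [PySem.List.pyRange_one_append 0 (j : Int) (n : Int) (by positivity) (by exact_mod_cast h)]
  exact List.take_left' (by rw [PySem.List.length_pyRange_one]; omega)

theorem pd_drop_pyRange (k n : Nat) :
    (PySem.List.pyRange 0 (n : Int) 1).drop k = PySem.List.pyRange (k : Int) (n : Int) 1 := by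
  by_cases h : k ≤ n
  · rw [PySem.List.pyRange_one_append 0 (k : Int) (n : Int) (by positivity) (by exact_mod_cast h)]
    exact List.drop_left' (by rw [PySem.List.length_pyRange_one]; omega)
  · rw [List.drop_eq_nil_of_le (by rw [PySem.List.length_pyRange_one]; omega),
      PySem.List.pyRange_one_eq_nil (by exact_mod_cast Nat.le_of_not_le h)]

theorem parse_digits_main : ∀ (n : Nat) (seq : List Int)
    (treeA : List (List (Int ⊕ List Int))),
    seq.length = n → 1 ≤ n → (∀ x ∈ seq.dropLast, x < 100) →
    (parse_digits_helper n seq treeA).map (fun elt => elt.map pdWrap)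
      = parse_digits_alt_loop n seq (treeA.map (fun elt => elt.map pdWrap)) := by
  intro n
  induction n with
  | zero => intro seq treeA _ h1 _; omega
  | succ n ih =>
    intro seq treeA hlen h1 hpre
    by_cases hone : seq.length = 1
    · rw [parse_digits_helper, parse_digits_alt_loop, if_pos hone]
      rw [if_neg (by omega)]
      simp [pdWrap]
    · have h2 : 2 ≤ seq.length := by omega
      have hLlen : seq.dropLast.length = seq.length - 1 := by simp
      have hLne : seq.dropLast ≠ [] := by
        intro h; rw [h] at hLlen; simp at hLlen; omega
      obtain ⟨m, hm⟩ : ∃ m, PySem.List.min? seq.dropLast (fun x => x) = some m := by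
        cases hmm : PySem.List.min? seq.dropLast (fun x => x) with
        | none => exact absurd ((PySem.List.min?_eq_none_iff _ _).mp hmm) hLne
        | some m => exact ⟨m, rfl⟩
      have hmem : m ∈ seq.dropLast := PySem.List.min?_mem hm
      have hmin : ∀ y ∈ seq.dropLast, m ≤ y := PySem.List.min?_isMin hm
      have hm100 : m < 100 := hpre m hmem
      obtain ⟨j, hj⟩ : ∃ j, PySem.List.index? seq.dropLast m = some j := by
        cases hjj : PySem.List.index? seq.dropLast m with
        | none => exact absurd hmem ((PySem.List.index?_eq_none_iff _ _).mp hjj)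
        | some j => exact ⟨j, rfl⟩
      obtain ⟨hjlt, -, -⟩ := PySem.List.getElem_of_index?_eq_some hj
      have hne : seq ≠ [] := by intro h; rw [h] at h2; simp at h2
      have hjseq : PySem.List.index? seq m = some j := by
        conv_lhs => rw [← List.dropLast_append_getLast hne]
        rw [PySem.List.index?_append_of_mem _ hmem, hj]
      -- unfold one step of each
      rw [parse_digits_helper, parse_digits_alt_loop]
      rw [if_neg hone, if_pos (by omega)]
      simp only [PySem.List.slice_to_neg_one, hm, hjseq,
        pd_fold_argmin seq.dropLast m j 0 100 (-1) hmin hm100 hj, zero_add]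
      have hjn : j + 2 ≤ seq.length := by omega
      -- rewrite the slices
      rw [PySem.List.slice_to_natCast, PySem.List.slice_to_natCast]
      have e1 : ((j : Int) + 1) = ((j + 1 : Nat) : Int) := by push_cast; ring
      have e2 : ((j : Int) + 2) = ((j + 2 : Nat) : Int) := by push_cast; ring
      rw [e1, e2, PySem.List.slice_from_natCast, PySem.List.slice_from_natCast]
      rw [pd_take_pyRange j seq.length (by omega), pd_drop_pyRange (j+2) seq.length]
      rw [← List.eraseIdx_eq_take_drop_succ]
      have hpre' : ∀ x ∈ (seq.eraseIdx j).dropLast, x < 100 := by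
        intro x hx
        have : (seq.eraseIdx j).dropLast = seq.dropLast.eraseIdx j := by
          conv_lhs => rw [← List.dropLast_append_getLast hne]
          rw [List.eraseIdx_append_of_lt_length hjlt, List.dropLast_concat]
        rw [this] at hx
        exact hpre x (List.mem_of_mem_eraseIdx hx)
      have hlen' : (seq.eraseIdx j).length = n := by
        rw [List.length_eraseIdx_of_lt (by omega)]; omega
      have h1' : 1 ≤ n := by omega
      rw [ih (seq.eraseIdx j) _ hlen' h1' hpre']
      congr 1
      simp [List.map_append, Function.comp_def, pdWrap]


-- ===== VERDICT (by name: the statement is the Claim_ definition above) =====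
theorem parse_digits_spec : Claim_equal_parse_digits := by
  intro seq _ hpre
  obtain ⟨hne, hpre⟩ := hpre
  unfold Spec_parse_digits parse_digits parse_digits_alt
  by_cases hone : seq.length = 1
  · simp [hone]
  · rw [if_neg hone, if_neg hone]
    have h1 : 1 ≤ seq.length := by
      rcases seq with _ | _
      · exact absurd rfl hne
      · simp
    rw [parse_digits_main seq.length seq _ rfl h1 hpre]
    congr 1
    simp [pdWrap]
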